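-- pv_equiv track=rewrite | github.com/Bharath-970/kaggle-comp | scripts/ideas_stack.py | _chain_is_valid
-- ===== SOURCE A (Python) =====
-- def _parse_shift(n: str) -> tuple[int, int] | None:
--     if not n.startswith("shift_"): return None
--     parts = n.split("_")
--     try: return int(parts[1]), int(parts[2])
--     except: return None
--
-- def _chain_is_valid(names: list[str]) -> bool:
--     categories = {
--         "identity": "none",
--         "transpose": "geo", "rot90": "geo", "rot180": "geo", "rot270": "geo",
--         "flip_h": "geo", "flip_v": "geo",
--         "erode1": "morph", "dilate1": "morph", "erode2": "morph", "dilate2": "morph",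
--         "adj_mask": "mask", "border_mask": "mask",
--         "project_r": "proj", "project_l": "proj", "project_d": "proj", "project_u": "proj",
--         "coll_proj_r": "proj", "coll_proj_l": "proj", "coll_proj_d": "proj", "coll_proj_u": "proj",
--         "rank_0_mask": "mask", "rank_1_mask": "mask", "border_aware_mask": "mask",
--         "rank_perm_identity": "map", "rank_perm_reverse": "map",
--         "kronecker": "scale",
--     }
--     def get_cat(name):
--         if name.startswith("shift"): return "shift"
--         if name.startswith("scale"): return "scale"
--         if name.startswith("tile"): return "scale"
--         return categories.get(name, "unknown")
--
--     cats = [get_cat(n) for n in names]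
--     for i in range(len(cats) - 2):
--         if cats[i] == cats[i+1] == cats[i+2]: return False
--
--     if "identity" in names[1:]: return False
--
--     for i in range(len(names)-1):
--         if names[i] == names[i+1]: return False
--         if names[i] in ("project_r", "project_l") and names[i+1] in ("project_r", "project_l"): return False
--         if names[i] in ("project_u", "project_d") and names[i+1] in ("project_u", "project_d"): return False
--         sx_sy = _parse_shift(names[i])
--         nx_ny = _parse_shift(names[i+1])
--         if sx_sy is not None and nx_ny is not None:
--             sx, sy = sx_sy
--             nx, ny = nx_ny
--             if sx+nx==0 and sy+ny==0: return False
--     return True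
-- ===== SOURCE B (Python) =====
-- # B: single fused forward pass carrying (prev name, prev cat, prev shift, cat before prev)
-- # instead of A's three separate scans over precomputed lists.
--
-- def _parse_shift(n):
--     if not n.startswith("shift_"): return None
--     parts = n.split("_")
--     try: return int(parts[1]), int(parts[2])
--     except: return None
--
-- _CATEGORIES = {
--     "identity": "none",
--     "transpose": "geo", "rot90": "geo", "rot180": "geo", "rot270": "geo",
--     "flip_h": "geo", "flip_v": "geo",
--     "erode1": "morph", "dilate1": "morph", "erode2": "morph", "dilate2": "morph",
--     "adj_mask": "mask", "border_mask": "mask",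
--     "project_r": "proj", "project_l": "proj", "project_d": "proj", "project_u": "proj",
--     "coll_proj_r": "proj", "coll_proj_l": "proj", "coll_proj_d": "proj", "coll_proj_u": "proj",
--     "rank_0_mask": "mask", "rank_1_mask": "mask", "border_aware_mask": "mask",
--     "rank_perm_identity": "map", "rank_perm_reverse": "map",
--     "kronecker": "scale",
-- }
--
-- def _get_cat(name):
--     if name.startswith("shift"): return "shift"
--     if name.startswith("scale"): return "scale"
--     if name.startswith("tile"): return "scale"
--     return _CATEGORIES.get(name, "unknown")
--
-- def _chain_is_valid(names):
--     if not names: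
--         return True
--     prev_name = names[0]
--     prev_cat = _get_cat(prev_name)
--     prev_shift = _parse_shift(prev_name)
--     prev2_cat = None
--     for n in names[1:]:
--         c = _get_cat(n)
--         s = _parse_shift(n)
--         if n == "identity" or n == prev_name: return False
--         if prev_name in ("project_r", "project_l") and n in ("project_r", "project_l"): return False
--         if prev_name in ("project_u", "project_d") and n in ("project_u", "project_d"): return False
--         if prev_shift is not None and s is not None and prev_shift[0] + s[0] == 0 and prev_shift[1] + s[1] == 0:
--             return False
--         if prev2_cat is not None and prev2_cat == prev_cat == c: return False
--         prev2_cat, prev_cat, prev_name, prev_shift = prev_cat, c, n, s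
--     return True
-- ===== Notes on version B (the rewrite author's own statement) =====
-- stated objective: faster
-- what changed: Replaces A's three separate passes (precomputed category list plus an index-window scan, a membership scan of the tail, an indexed adjacent-pair scan that re-parses each shift twice) by one fused forward loop carrying the previous name, the previous two categories and the previous parsed shift as running state, parsing/categorising each name exactly once and stopping at the first violation.
import Mathlib
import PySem

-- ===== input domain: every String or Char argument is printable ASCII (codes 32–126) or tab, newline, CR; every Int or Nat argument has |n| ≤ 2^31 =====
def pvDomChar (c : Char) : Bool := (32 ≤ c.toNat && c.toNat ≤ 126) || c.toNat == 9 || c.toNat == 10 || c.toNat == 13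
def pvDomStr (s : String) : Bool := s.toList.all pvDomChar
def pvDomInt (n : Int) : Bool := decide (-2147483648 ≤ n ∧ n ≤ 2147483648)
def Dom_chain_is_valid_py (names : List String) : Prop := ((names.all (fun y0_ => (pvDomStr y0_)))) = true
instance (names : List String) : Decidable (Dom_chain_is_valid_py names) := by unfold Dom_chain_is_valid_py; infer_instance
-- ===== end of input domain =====

-- B replaces A's three separate scans by one fused forward pass carrying the previous name,
-- the previous two categories and the previous parsed shift as running state (alternative decomposition, same cost).

-- shared module helpers (_parse_shift and the category table / get_cat are identical in both Pythons)
def pvParseShift (n : String) : Option (Int × Int) :=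
  if ¬ PySem.Str.startswith n "shift_" then none
  else
    let parts := (PySem.Str.split? n "_").getD []
    match PySem.List.pyGet? parts 1 with
    | none => none
    | some p1 =>
      match PySem.Int.ofStr? p1 with
      | none => none
      | some a =>
        match PySem.List.pyGet? parts 2 with
        | none => none
        | some p2 =>
          match PySem.Int.ofStr? p2 with
          | none => none
          | some b => some (a, b)

def pvCategories : PySem.Dict String String := PySem.Dict.ofList
  [("identity", "none"),
   ("transpose", "geo"), ("rot90", "geo"), ("rot180", "geo"), ("rot270", "geo"),
   ("flip_h", "geo"), ("flip_v", "geo"),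
   ("erode1", "morph"), ("dilate1", "morph"), ("erode2", "morph"), ("dilate2", "morph"),
   ("adj_mask", "mask"), ("border_mask", "mask"),
   ("project_r", "proj"), ("project_l", "proj"), ("project_d", "proj"), ("project_u", "proj"),
   ("coll_proj_r", "proj"), ("coll_proj_l", "proj"), ("coll_proj_d", "proj"), ("coll_proj_u", "proj"),
   ("rank_0_mask", "mask"), ("rank_1_mask", "mask"), ("border_aware_mask", "mask"),
   ("rank_perm_identity", "map"), ("rank_perm_reverse", "map"),
   ("kronecker", "scale")]

def pvGetCat (name : String) : String :=
  if PySem.Str.startswith name "shift" then "shift"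
  else if PySem.Str.startswith name "scale" then "scale"
  else if PySem.Str.startswith name "tile" then "scale"
  else pvCategories.getD name "unknown"

-- ===== PORT A =====
-- for i in range(len(cats) - 2): if cats[i] == cats[i+1] == cats[i+2]: return False
-- (indices stay in range, so getD is exactly Python's cats[i])
def pvChkTriple (cats : List String) (i : Nat) : Bool :=
  if i < cats.length - 2 then
    if cats.getD i "" == cats.getD (i+1) "" && cats.getD (i+1) "" == cats.getD (i+2) "" then false
    else pvChkTriple cats (i+1)
  else true
termination_by cats.length - i
decreasing_by omega

-- for i in range(len(names)-1): the four adjacent-pair rejections of A, index-based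
def pvChkPairs (names : List String) (i : Nat) : Bool :=
  if i < names.length - 1 then
    if names.getD i "" == names.getD (i+1) "" then false
    else if (names.getD i "" == "project_r" || names.getD i "" == "project_l") &&
            (names.getD (i+1) "" == "project_r" || names.getD (i+1) "" == "project_l") then false
    else if (names.getD i "" == "project_u" || names.getD i "" == "project_d") &&
            (names.getD (i+1) "" == "project_u" || names.getD (i+1) "" == "project_d") then false
    else
      match pvParseShift (names.getD i ""), pvParseShift (names.getD (i+1) "") with
      | some (sx, sy), some (nx, ny) =>
        if sx + nx == 0 && sy + ny == 0 then false else pvChkPairs names (i+1)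
      | _, _ => pvChkPairs names (i+1)
  else true
termination_by names.length - i
decreasing_by all_goals omega

def chain_is_valid_py (names : List String) : Bool :=
  let cats := names.map pvGetCat
  if pvChkTriple cats 0 then
    if (PySem.List.slice names (some 1) none).contains "identity" then false
    else pvChkPairs names 0
  else false

-- ===== PORT B =====
-- the fused loop: state = (prev name, prev cat, prev shift, category before prev)
def pvGoB (rest : List String) (pn pc : String) (ps : Option (Int × Int)) (pp : Option String) : Bool :=
  match rest with
  | [] => true
  | n :: rs =>
    let c := pvGetCat n
    let s := pvParseShift n
    if n == "identity" || n == pn then false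
    else if (pn == "project_r" || pn == "project_l") && (n == "project_r" || n == "project_l") then false
    else if (pn == "project_u" || pn == "project_d") && (n == "project_u" || n == "project_d") then false
    else if (match ps, s with
             | some (a, b), some (x, y) => a + x == 0 && b + y == 0
             | _, _ => false) then false
    else if pp == some pc && pc == c then false
    else pvGoB rs n c s (some pc)

def chain_is_valid_py_alt (names : List String) : Bool :=
  match names with
  | [] => true
  | n :: rs => pvGoB rs n (pvGetCat n) (pvParseShift n) none

-- ===== PRECONDITION & SPEC =====
def Spec_chain_is_valid_py (names : List String) (out : Bool) : Prop := out = chain_is_valid_py_alt names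
instance (names : List String) (out : Bool) : Decidable (Spec_chain_is_valid_py names out) := by unfold Spec_chain_is_valid_py; infer_instance

-- ===== CLAIM (what is proved, stated in full; the proofs are below) =====
def Claim_equal_chain_is_valid_py : Prop := ∀ (names : List String), Dom_chain_is_valid_py names → Spec_chain_is_valid_py names (chain_is_valid_py names)

-- ===== LEMMAS AND PROOFS =====

-- proof-side structural characterisations of the three checks
def pvBad2 (x y : String) : Bool :=
  (x == y) ||
  ((x == "project_r" || x == "project_l") && (y == "project_r" || y == "project_l")) ||
  ((x == "project_u" || x == "project_d") && (y == "project_u" || y == "project_d")) ||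
  (match pvParseShift x, pvParseShift y with
   | some (a, b), some (c, d) => a + c == 0 && b + d == 0
   | _, _ => false)

def pvPairOK : List String → Bool
  | x :: y :: rs => !pvBad2 x y && pvPairOK (y :: rs)
  | _ => true

def pvTri : List String → Bool
  | a :: b :: c :: rs => !(a == b && b == c) && pvTri (b :: c :: rs)
  | _ => true

theorem chkT_cons (a : String) (cats : List String) (i : Nat) :
    pvChkTriple (a :: cats) (i + 1) = pvChkTriple cats i := by
  fun_induction pvChkTriple cats i with
  | case1 i h h2 =>
    rw [pvChkTriple]
    simp only [List.length_cons, List.getD_cons_succ]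
    rw [if_pos (by omega), if_pos (by simpa using h2)]
  | case2 i h h2 ih =>
    rw [pvChkTriple]
    simp only [List.length_cons, List.getD_cons_succ]
    rw [if_pos (by omega), if_neg (by simpa using h2), ih]
  | case3 i h =>
    rw [pvChkTriple]
    simp only [List.length_cons]
    rw [if_neg (by omega)]
theorem pvChkTriple_eq_tri (cats : List String) : pvChkTriple cats 0 = pvTri cats := by
  fun_induction pvTri cats with
  | case1 a b c rs ih =>
    rw [pvChkTriple]
    simp only [List.length_cons, List.getD_cons_succ, List.getD_cons_zero]
    rw [if_pos (by omega)]
    by_cases h : (a == b && b == c) = true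
    · simp [pvTri, h]
    · rw [if_neg (by simpa using h), chkT_cons, ih]
      simp [pvTri, h]
  | case2 l h =>
    rcases l with _ | ⟨a, _ | ⟨b, _ | ⟨c, rs⟩⟩⟩
    · rw [pvChkTriple]; simp [pvTri]
    · rw [pvChkTriple]; simp [pvTri]
    · rw [pvChkTriple]; simp [pvTri]
    · exact (h a b c rs rfl).elim

theorem chkP_cons (a : String) (names : List String) (i : Nat) :
    pvChkPairs (a :: names) (i + 1) = pvChkPairs names i := by
  fun_induction pvChkPairs names i with
  | case1 i h h1 =>
    rw [pvChkPairs]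
    simp only [List.length_cons, List.getD_cons_succ]
    rw [if_pos (by omega), if_pos h1]
  | case2 i h h1 h2 =>
    rw [pvChkPairs]
    simp only [List.length_cons, List.getD_cons_succ]
    rw [if_pos (by omega), if_neg h1, if_pos h2]
  | case3 i h h1 h2 h3 =>
    rw [pvChkPairs]
    simp only [List.length_cons, List.getD_cons_succ]
    rw [if_pos (by omega), if_neg h1, if_neg h2, if_pos h3]
  | case4 i h h1 h2 h3 sx sy nx ny e1 e2 hs =>
    rw [pvChkPairs]
    simp only [List.length_cons, List.getD_cons_succ]
    rw [if_pos (by omega), if_neg h1, if_neg h2, if_neg h3]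
    rw [e1, e2]
    simp only [hs, if_pos]
  | case5 i h h1 h2 h3 sx sy nx ny e1 e2 hs ih =>
    rw [pvChkPairs]
    simp only [List.length_cons, List.getD_cons_succ]
    rw [if_pos (by omega), if_neg h1, if_neg h2, if_neg h3]
    rw [e1, e2]
    simp only []
    rw [if_neg hs, ih]
  | case6 i h h1 h2 h3 hm ih =>
    rw [pvChkPairs]
    simp only [List.length_cons, List.getD_cons_succ]
    rw [if_pos (by omega), if_neg h1, if_neg h2, if_neg h3]
    rcases h4 : pvParseShift (names.getD i "") with _ | ⟨sx, sy⟩ <;>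
      rcases h5 : pvParseShift (names.getD (i+1) "") with _ | ⟨nx, ny⟩ <;>
      simp_all
  | case7 i h =>
    rw [pvChkPairs]
    simp only [List.length_cons]
    rw [if_neg (by omega)]

theorem chkP_eq (names : List String) : pvChkPairs names 0 = pvPairOK names := by
  fun_induction pvPairOK names with
  | case1 x y rs ih =>
    rw [pvChkPairs]
    simp only [List.length_cons, List.getD_cons_succ, List.getD_cons_zero]
    rw [if_pos (by omega)]
    rw [pvBad2]
    by_cases h1 : (x == y) = true
    · simp [h1]
    · rw [if_neg h1]
      by_cases h2 : ((x == "project_r" || x == "project_l") && (y == "project_r" || y == "project_l")) = true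
      · simp [h1, h2]
      · rw [if_neg h2]
        by_cases h3 : ((x == "project_u" || x == "project_d") && (y == "project_u" || y == "project_d")) = true
        · simp [h1, h2, h3]
        · rw [if_neg h3]
          rcases hm : pvParseShift x with _ | ⟨a, b⟩ <;> rcases hm2 : pvParseShift y with _ | ⟨c, d⟩ <;>
            simp only [] <;> rw [chkP_cons, ih]
          · simp [h1, h2, h3, hm, hm2]
          · simp [h1, h2, h3, hm, hm2]
          · simp [h1, h2, h3, hm, hm2]
          · by_cases h4 : (a + c == 0 && b + d == 0) = true
            · simp [h1, h2, h3, hm, hm2, h4]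
            · simp [h1, h2, h3, hm, hm2, h4]
  | case2 l h =>
    rcases l with _ | ⟨a, _ | ⟨b, rs⟩⟩
    · rw [pvChkPairs]; simp [pvPairOK]
    · rw [pvChkPairs]; simp [pvPairOK]
    · exact (h a b rs rfl).elim

lemma pvGoB_eq (rest : List String) : ∀ (pn : String) (pp : Option String),
    pvGoB rest pn (pvGetCat pn) (pvParseShift pn) pp =
      (rest.all (fun n => !(n == "identity")) && pvPairOK (pn :: rest) &&
        pvTri ((pp.toList) ++ (pn :: rest).map pvGetCat)) := by
  induction rest with
  | nil => intro pn pp; cases pp <;> simp [pvGoB, pvPairOK, pvTri]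
  | cons n rs ih =>
    intro pn pp
    rw [pvGoB.eq_def]
    simp only []
    have hpair : pvPairOK (pn :: n :: rs) = (!pvBad2 pn n && pvPairOK (n :: rs)) := rfl
    by_cases h1 : (n == "identity" || n == pn) = true
    · rw [if_pos h1]
      rcases Bool.or_eq_true_iff.mp h1 with h | h
      · simp [h]
      · rw [hpair, pvBad2]
        have : (pn == n) = true := by simpa [BEq.comm] using h
        simp [this]
    · rw [if_neg h1]
      simp only [Bool.or_eq_true, not_or, Bool.not_eq_true] at h1
      obtain ⟨hid, hne⟩ := h1
      by_cases h2 : ((pn == "project_r" || pn == "project_l") && (n == "project_r" || n == "project_l")) = true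
      · rw [if_pos h2, hpair, pvBad2]
        simp [h2, hid]
      · rw [if_neg h2]
        by_cases h3 : ((pn == "project_u" || pn == "project_d") && (n == "project_u" || n == "project_d")) = true
        · rw [if_pos h3, hpair, pvBad2]
          simp [h3, hid]
        · rw [if_neg h3]
          have hb : ((pn == n) : Bool) = false := by
            simp only [beq_eq_false_iff_ne, ne_eq] at hne ⊢
            exact fun hc => hne hc.symm
          have htcommon : ∀ (hrest : Bool),
              (if ((pp == some (pvGetCat pn)) && (pvGetCat pn == pvGetCat n)) = true then false
               else hrest && pvTri ((some (pvGetCat pn)).toList ++ List.map pvGetCat (n :: rs))) =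
                (hrest && pvTri (pp.toList ++ List.map pvGetCat (pn :: n :: rs))) := by
            intro hrest
            by_cases h5 : ((pp == some (pvGetCat pn)) && (pvGetCat pn == pvGetCat n)) = true
            · rw [if_pos h5]
              cases pp with
              | none => simp at h5
              | some q =>
                simp only [Bool.and_eq_true, beq_iff_eq, Option.some.injEq] at h5
                have : pvTri (q :: pvGetCat pn :: pvGetCat n :: rs.map pvGetCat) = false := by
                  rw [pvTri]; simp [h5.1, h5.2]
                simp only [Option.toList_some, List.map_cons, List.cons_append, List.nil_append]
                simp [this]
            · rw [if_neg h5]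
              have htri : pvTri (pp.toList ++ pvGetCat pn :: pvGetCat n :: rs.map pvGetCat) =
                  pvTri (pvGetCat pn :: pvGetCat n :: rs.map pvGetCat) := by
                cases pp with
                | none => rfl
                | some q =>
                  show pvTri (q :: pvGetCat pn :: pvGetCat n :: rs.map pvGetCat) = _
                  rw [pvTri]
                  have hq : (q == pvGetCat pn && pvGetCat pn == pvGetCat n) = false := by
                    by_contra hc
                    simp only [Bool.not_eq_false, Bool.and_eq_true, beq_iff_eq] at hc
                    simp [hc.1, hc.2] at h5
                  simp [hq]
              simp only [Option.toList_some, List.map_cons, List.cons_append, List.nil_append, htri]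
          rcases hp : pvParseShift pn with _ | ⟨a, b⟩ <;> rcases hq : pvParseShift n with _ | ⟨x, y⟩
          · rw [if_neg (by simp), ← hq, ih n (some (pvGetCat pn)), htcommon, hpair, pvBad2, hp, hq]
            simp only [List.all_cons, hid, Bool.true_and, hb, h2, h3, Bool.false_or, Bool.or_false]
            simp
          · rw [if_neg (by simp), ← hq, ih n (some (pvGetCat pn)), htcommon, hpair, pvBad2, hp, hq]
            simp only [List.all_cons, hid, Bool.true_and, hb, h2, h3, Bool.false_or, Bool.or_false]
            simp
          · rw [if_neg (by simp), ← hq, ih n (some (pvGetCat pn)), htcommon, hpair, pvBad2, hp, hq]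
            simp only [List.all_cons, hid, Bool.true_and, hb, h2, h3, Bool.false_or, Bool.or_false]
            simp
          · by_cases h4 : (a + x == 0 && b + y == 0) = true
            · rw [if_pos h4, hpair, pvBad2, hp, hq]
              simp only [h4]
              simp
            · rw [if_neg h4, ← hq, ih n (some (pvGetCat pn)), htcommon, hpair, pvBad2, hp, hq]
              simp only [List.all_cons, hid, Bool.true_and, hb, h2, h3, h4, Bool.false_or, Bool.or_false]
              simp

lemma contains_eq_not_all (l : List String) :
    l.contains "identity" = !(l.all (fun n => !(n == "identity"))) := by
  induction l with
  | nil => simp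
  | cons x xs ih =>
    rw [List.contains_cons, ih]
    simp [Bool.beq_comm]

-- ===== VERDICT (by name: the statement is the Claim_ definition above) =====
theorem chain_is_valid_py_spec : Claim_equal_chain_is_valid_py := by
  intro names _
  unfold Spec_chain_is_valid_py
  cases names with
  | nil =>
    have h1 : pvChkTriple ([] : List String) 0 = true := by rw [pvChkTriple]; simp
    have h2 : pvChkPairs [] 0 = true := by rw [pvChkPairs]; simp
    simp [chain_is_valid_py, chain_is_valid_py_alt, h1, h2, PySem.List.slice_from_one]
  | cons n rs =>
    show (if pvChkTriple ((n :: rs).map pvGetCat) 0 then _ else false) = _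
    rw [chain_is_valid_py_alt.eq_def]
    simp only []
    rw [pvGoB_eq rs n none]
    rw [pvChkTriple_eq_tri, PySem.List.slice_from_one, List.tail_cons, contains_eq_not_all,
      chkP_eq]
    simp only [Option.toList_none, List.nil_append]
    cases hA : List.all rs (fun m => !(m == "identity")) <;>
      cases hB : pvPairOK (n :: rs) <;>
      cases hC : pvTri ((n :: rs).map pvGetCat) <;> simp_all
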